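-- pv_equiv track=rewrite | github.com/asigalov61/tegridy-tools | Examples/Orpheus_Music_Transformer_Gradio_App_Example.py | sanitize_tokens
-- ===== SOURCE A (Python) =====
-- def extract_pairs_and_prefix(lst):
--
--     RANGE1 = (0, 255)
--     RANGE2 = (256, 16767)
--     RANGE3 = (16768, 18815)
--     RANGE4 = (18816, 18819)
--
--     def in_range(x, r):
--         return r[0] <= x <= r[1]
--
--     prefix = []
--     started = False
--
--     for x in lst:
--         if in_range(x, RANGE2):
--             started = True
--             break
--
--         prefix.append(x)
--
--     pairs = []
--     pending = None
--
--     for x in lst: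
--         if in_range(x, RANGE2):
--             pending = x
--
--         elif in_range(x, RANGE3):
--             if pending is not None:
--                 pairs.append((pending, x))
--                 pending = None
--
--         elif in_range(x, RANGE4):
--             pairs.append((x, x))
--
--     return prefix, pairs
--
-- def sanitize_tokens(tokens):
--
--     chords = []
--     cho = []
--
--     for t in tokens:
--         if t < 256:
--             if cho:
--                 chords.append(cho)
--
--             cho = [t]
--
--         else:
--             cho.append(t)
--
--     if cho:
--         chords.append(cho)
--
--     san_tokens = []
--
--     for cho in chords:
--         pfx, ptcs_durs = extract_pairs_and_prefix(cho)
--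
--         san_tokens.extend(pfx)
--
--         san_ptcs_durs = []
--         seen = []
--
--         for ptc, dur in ptcs_durs:
--             if 256 <= ptc < 16768:
--                 if ptc not in seen:
--                     san_tokens.append(ptc)
--                     san_tokens.append(dur)
--                     seen.append(ptc)
--
--             else:
--                 san_tokens.append(ptc)
--
--     return san_tokens
-- ===== SOURCE B (Python) =====
-- def sanitize_tokens(tokens):
--     # Single linear pass: prefix tokens go straight to output, pair output is
--     # buffered per chord and flushed at each chord boundary / end of input.
--     out = []
--     in_prefix = True
--     pending = None
--     seen = []
--     pair_out = []
--
--     for t in tokens: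
--         if t < 256:
--             out.extend(pair_out)
--             in_prefix, pending, seen, pair_out = True, None, [], []
--             out.append(t)
--         elif 256 <= t <= 16767:
--             in_prefix = False
--             pending = t
--         else:
--             if in_prefix:
--                 out.append(t)
--             if 16768 <= t <= 18815:
--                 if pending is not None:
--                     if pending not in seen:
--                         pair_out.append(pending)
--                         pair_out.append(t)
--                         seen.append(pending)
--                     pending = None
--             elif 18816 <= t <= 18819:
--                 pair_out.append(t)
--
--     out.extend(pair_out)
--     return out
-- ===== Notes on version B (the rewrite author's own statement) =====
-- stated objective: simpler
-- what changed: Replaced A's three-phase design (split tokens into a list of chords, then per chord a prefix scan plus a pairs scan plus a dedup pass over the pairs) by one linear pass over the token stream with per-chord state (in_prefix flag, pending pitch, seen list, buffered pair output flushed at chord boundaries).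
import Mathlib
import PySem

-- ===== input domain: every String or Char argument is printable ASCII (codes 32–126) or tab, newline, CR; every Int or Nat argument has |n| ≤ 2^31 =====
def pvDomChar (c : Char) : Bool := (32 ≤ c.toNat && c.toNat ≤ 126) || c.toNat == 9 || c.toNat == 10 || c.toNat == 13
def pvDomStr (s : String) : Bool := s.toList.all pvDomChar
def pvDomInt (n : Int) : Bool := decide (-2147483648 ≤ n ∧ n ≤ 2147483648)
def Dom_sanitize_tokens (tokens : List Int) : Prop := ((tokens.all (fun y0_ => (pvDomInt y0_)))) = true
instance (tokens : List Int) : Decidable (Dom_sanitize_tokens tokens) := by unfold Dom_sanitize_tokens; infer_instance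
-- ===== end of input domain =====

-- B replaces A's chord-splitting plus double scan per chord by one linear pass with
-- per-chord state and a buffered pair output (objective: simpler decomposition).

-- ===== PORT A =====
-- A's first loop in extract_pairs_and_prefix: collect tokens until the first RANGE2 token (break)
def extractPrefix : List Int → List Int
  | [] => []
  | x :: xs => if 256 ≤ x ∧ x ≤ 16767 then [] else x :: extractPrefix xs

-- A's second loop in extract_pairs_and_prefix: state = (pairs, pending)
def pairsStep (s : List (Int × Int) × Option Int) (x : Int) : List (Int × Int) × Option Int :=
  if 256 ≤ x ∧ x ≤ 16767 then (s.1, some x)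
  else if 16768 ≤ x ∧ x ≤ 18815 then
    match s.2 with
    | some p => (s.1 ++ [(p, x)], none)
    | none => (s.1, none)
  else if 18816 ≤ x ∧ x ≤ 18819 then (s.1 ++ [(x, x)], s.2)
  else s

def extract_pairs_and_prefix (lst : List Int) : List Int × List (Int × Int) :=
  (extractPrefix lst, (lst.foldl pairsStep ([], none)).1)

-- A's chord-splitting loop: state = (chords, cho)
def splitStep (s : List (List Int) × List Int) (t : Int) : List (List Int) × List Int :=
  if t < 256 then (if s.2 ≠ [] then s.1 ++ [s.2] else s.1, [t]) else (s.1, s.2 ++ [t])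

-- A's per-pair sanitising loop: state = (san_tokens, seen)
def dedupStep (s : List Int × List Int) (pd : Int × Int) : List Int × List Int :=
  if 256 ≤ pd.1 ∧ pd.1 < 16768 then
    if pd.1 ∈ s.2 then s else (s.1 ++ [pd.1, pd.2], s.2 ++ [pd.1])
  else (s.1 ++ [pd.1], s.2)

-- A's per-chord body: extend with the prefix, then the dedup loop with fresh seen
def processChord (acc : List Int) (cho : List Int) : List Int :=
  ((extract_pairs_and_prefix cho).2.foldl dedupStep (acc ++ (extract_pairs_and_prefix cho).1, [])).1

def sanitize_tokens (tokens : List Int) : List Int :=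
  let s := tokens.foldl splitStep ([], [])
  (if s.2 ≠ [] then s.1 ++ [s.2] else s.1).foldl processChord []

-- ===== PORT B =====
-- B's single-pass state: (out, in_prefix, pending, seen, pair_out)
def bstep (s : List Int × Bool × Option Int × List Int × List Int) (t : Int) :
    List Int × Bool × Option Int × List Int × List Int :=
  let (out, inp, pend, seen, pair) := s
  if t < 256 then (out ++ pair ++ [t], true, none, [], [])
  else if 256 ≤ t ∧ t ≤ 16767 then (out, false, some t, seen, pair)
  else
    let out := if inp then out ++ [t] else out
    if 16768 ≤ t ∧ t ≤ 18815 then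
      match pend with
      | some p =>
        if p ∈ seen then (out, inp, none, seen, pair)
        else (out, inp, none, seen ++ [p], pair ++ [p, t])
      | none => (out, inp, none, seen, pair)
    else if 18816 ≤ t ∧ t ≤ 18819 then (out, inp, pend, seen, pair ++ [t])
    else (out, inp, pend, seen, pair)

def sanitize_tokens_alt (tokens : List Int) : List Int :=
  let s := tokens.foldl bstep ([], true, none, [], [])
  s.1 ++ s.2.2.2.2

-- ===== PRECONDITION & SPEC =====
def Spec_sanitize_tokens (tokens : List Int) (out : List Int) : Prop := out = sanitize_tokens_alt tokens
instance (tokens : List Int) (out : List Int) : Decidable (Spec_sanitize_tokens tokens out) := by unfold Spec_sanitize_tokens; infer_instance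

-- ===== CLAIM (what is proved, stated in full; the proofs are below) =====
def Claim_equal_sanitize_tokens : Prop := ∀ (tokens : List Int), Dom_sanitize_tokens tokens → Spec_sanitize_tokens tokens (sanitize_tokens tokens)

-- ===== LEMMAS AND PROOFS =====

-- proof-side mirror of B's pairs logic (pend, seen, pair), without the out/flush parts
def istep (s : Option Int × List Int × List Int) (t : Int) : Option Int × List Int × List Int :=
  if t < 256 then s
  else if 256 ≤ t ∧ t ≤ 16767 then (some t, s.2.1, s.2.2)
  else if 16768 ≤ t ∧ t ≤ 18815 then
    match s.1 with
    | some p =>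
      if p ∈ s.2.1 then (none, s.2.1, s.2.2)
      else (none, s.2.1 ++ [p], s.2.2 ++ [p, t])
    | none => (none, s.2.1, s.2.2)
  else if 18816 ≤ t ∧ t ≤ 18819 then (s.1, s.2.1, s.2.2 ++ [t])
  else s

def chordSt (cho : List Int) : Option Int × List Int × List Int := cho.foldl istep (none, [], [])

def hasR2 (cho : List Int) : Bool := cho.any (fun x => decide (256 ≤ x ∧ x ≤ 16767))

def pendOK : Option Int → Prop
  | none => True
  | some p => 256 ≤ p ∧ p ≤ 16767

def Bfin (s : List Int × Bool × Option Int × List Int × List Int) : List Int := s.1 ++ s.2.2.2.2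

-- out is only ever appended to: frame lemma for B's fold
theorem bfold_out_frame (ts : List Int) : ∀ o0 o i p sn pr,
    ts.foldl bstep (o0 ++ o, i, p, sn, pr)
      = ((o0 ++ (ts.foldl bstep (o, i, p, sn, pr)).1,
          (ts.foldl bstep (o, i, p, sn, pr)).2)) := by
  induction ts with
  | nil => intro o0 o i p sn pr; simp
  | cons t ts ih =>
    intro o0 o i p sn pr
    simp only [List.foldl_cons]
    rw [show bstep (o0 ++ o, i, p, sn, pr) t
        = ((o0 ++ (bstep (o, i, p, sn, pr) t).1, (bstep (o, i, p, sn, pr) t).2)) by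
      simp only [bstep]
      split_ifs <;> (try split) <;> (try split_ifs) <;> simp]
    rcases h : bstep (o, i, p, sn, pr) t with ⟨o', i', p', sn', pr'⟩
    exact ih o0 o' i' p' sn' pr'

theorem bfin_frame (ts : List Int) (o : List Int) (i : Bool) (p : Option Int)
    (sn pr : List Int) :
    Bfin (ts.foldl bstep (o, i, p, sn, pr)) = o ++ Bfin (ts.foldl bstep ([], i, p, sn, pr)) := by
  have := bfold_out_frame ts o [] i p sn pr
  simp only [List.append_nil] at this
  rw [this]; simp [Bfin]

-- istep's pair buffer is append-only: frame lemma
theorem ifold_pair_frame (cho : List Int) : ∀ pd sn pr0 pr,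
    cho.foldl istep (pd, sn, pr0 ++ pr)
      = (( (cho.foldl istep (pd, sn, pr)).1, (cho.foldl istep (pd, sn, pr)).2.1,
          pr0 ++ (cho.foldl istep (pd, sn, pr)).2.2)) := by
  induction cho with
  | nil => intro pd sn pr0 pr; simp
  | cons t ts ih =>
    intro pd sn pr0 pr
    simp only [List.foldl_cons]
    rw [show istep (pd, sn, pr0 ++ pr) t
        = (((istep (pd, sn, pr) t).1, (istep (pd, sn, pr) t).2.1,
            pr0 ++ (istep (pd, sn, pr) t).2.2)) by
      simp only [istep]
      split_ifs <;> (try split) <;> (try split_ifs) <;> simp]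
    rcases h : istep (pd, sn, pr) t with ⟨p', sn', pr'⟩
    exact ih p' sn' pr0 pr'

-- A's pairs list is append-only too
theorem pairsfold_frame (cho : List Int) : ∀ l0 l pd,
    cho.foldl pairsStep (l0 ++ l, pd)
      = ((l0 ++ (cho.foldl pairsStep (l, pd)).1, (cho.foldl pairsStep (l, pd)).2)) := by
  induction cho with
  | nil => intro l0 l pd; simp
  | cons t ts ih =>
    intro l0 l pd
    simp only [List.foldl_cons]
    rw [show pairsStep (l0 ++ l, pd) t
        = ((l0 ++ (pairsStep (l, pd) t).1, (pairsStep (l, pd) t).2)) by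
      simp only [pairsStep]
      split_ifs <;> (try split) <;> simp]
    rcases h : pairsStep (l, pd) t with ⟨l', pd'⟩
    exact ih l0 l' pd'

-- FUSION: A's pairs-then-dedup equals B's inline pairs logic
theorem fusion (cho : List Int) : ∀ pd sn acc, pendOK pd →
    (((cho.foldl pairsStep ([], pd)).1).foldl dedupStep (acc, sn)).1
      = acc ++ (cho.foldl istep (pd, sn, [])).2.2 := by
  induction cho with
  | nil => intro pd sn acc h; simp
  | cons t ts ih =>
    intro pd sn acc h
    simp only [List.foldl_cons]
    by_cases h1 : 256 ≤ t ∧ t ≤ 16767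
    · have hp : pairsStep ([], pd) t = (([], some t)) := by simp [pairsStep, h1]
      have hi : istep (none, sn, ([] : List Int)) t = ((some t, sn, [])) := by
        simp [istep, h1]; try omega
      rw [hp, show istep (pd, sn, ([] : List Int)) t = ((some t, sn, [])) by
        simp [istep, h1]; try omega]
      exact ih _ _ _ (by simp [pendOK]; omega)
    · by_cases h2 : 16768 ≤ t ∧ t ≤ 18815
      · rcases pd with _ | p
        · rw [show pairsStep ([], none) t = (([], (none : Option Int))) by
            simp [pairsStep, h1, h2],
            show istep (none, sn, ([] : List Int)) t = ((none, sn, [])) by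
            simp [istep, h1, h2]; try omega]
          exact ih _ _ _ trivial
        · simp only [pendOK] at h
          rw [show pairsStep ([], some p) t = (([(p, t)], (none : Option Int))) by
            simp [pairsStep, h1, h2]]
          rw [show ([(p, t)] : List (Int × Int)) = [(p,t)] ++ [] by simp,
            pairsfold_frame ts [(p,t)] [] none]
          simp only [List.foldl_append, List.foldl_cons, List.foldl_nil]
          by_cases hs : p ∈ sn
          · rw [show dedupStep (acc, sn) (p, t) = ((acc, sn)) by
              simp [dedupStep, hs]; try omega,
              show istep (some p, sn, ([] : List Int)) t = ((none, sn, [])) by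
              simp [istep, h1, h2, hs]; try omega]
            exact ih _ _ _ trivial
          · rw [show dedupStep (acc, sn) (p, t) = ((acc ++ [p, t], sn ++ [p])) by
              simp [dedupStep, hs]; try omega,
              show istep (some p, sn, ([] : List Int)) t = ((none, sn ++ [p], [p, t])) by
              simp [istep, h1, h2, hs]; try omega]
            rw [show ([p, t] : List Int) = [p, t] ++ [] by simp,
              ifold_pair_frame ts none (sn ++ [p]) [p, t] []]
            simp only [List.append_nil]
            rw [ih none (sn ++ [p]) (acc ++ [p, t]) trivial]
            simp
      · by_cases h3 : 18816 ≤ t ∧ t ≤ 18819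
        · rw [show pairsStep ([], pd) t = (([(t, t)], pd)) by simp [pairsStep, h1, h2, h3]]
          rw [show ([(t, t)] : List (Int × Int)) = [(t,t)] ++ [] by simp,
            pairsfold_frame ts [(t,t)] [] pd]
          simp only [List.foldl_append, List.foldl_cons, List.foldl_nil]
          rw [show dedupStep (acc, sn) (t, t) = ((acc ++ [t], sn)) by
            simp [dedupStep]; try omega,
            show istep (pd, sn, ([] : List Int)) t = ((pd, sn, [t])) by
            simp [istep, h1, h2, h3]; try omega]
          rw [show ([t] : List Int) = [t] ++ [] by simp,
            ifold_pair_frame ts pd sn [t] []]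
          simp only [List.append_nil]
          rw [ih pd sn (acc ++ [t]) h]
          simp
        · rw [show pairsStep ([], pd) t = (([], pd)) by
            simp only [pairsStep]; split_ifs <;> simp_all,
            show istep (pd, sn, ([] : List Int)) t = ((pd, sn, [])) by
            simp only [istep]; split_ifs <;> simp_all]
          exact ih _ _ _ h

-- dedup's san_tokens accumulator is append-only
theorem dedup_acc_frame (ps : List (Int × Int)) : ∀ a0 a sn,
    ps.foldl dedupStep (a0 ++ a, sn)
      = ((a0 ++ (ps.foldl dedupStep (a, sn)).1, (ps.foldl dedupStep (a, sn)).2)) := by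
  induction ps with
  | nil => intro a0 a sn; simp
  | cons q ps ih =>
    intro a0 a sn
    simp only [List.foldl_cons]
    rw [show dedupStep (a0 ++ a, sn) q
        = ((a0 ++ (dedupStep (a, sn) q).1, (dedupStep (a, sn) q).2)) by
      simp only [dedupStep]; split_ifs <;> simp]
    rcases h : dedupStep (a, sn) q with ⟨a', sn'⟩
    exact ih a0 a' sn'

theorem processChord_frame (acc cho : List Int) :
    processChord acc cho = acc ++ processChord [] cho := by
  simp only [processChord]
  rw [show acc ++ (extract_pairs_and_prefix cho).1
      = acc ++ ((extract_pairs_and_prefix cho).1) by rfl]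
  rw [dedup_acc_frame _ acc ((extract_pairs_and_prefix cho).1) []]
  simp

theorem sanChords_snoc (chords : List (List Int)) (cho : List Int) :
    (chords ++ [cho]).foldl processChord [] = chords.foldl processChord [] ++ processChord [] cho := by
  simp only [List.foldl_append, List.foldl_cons, List.foldl_nil]
  exact processChord_frame _ _

-- one chord's output: prefix ++ inline pairs output
theorem processOne (cho : List Int) :
    processChord [] cho = extractPrefix cho ++ (chordSt cho).2.2 := by
  simp only [processChord, extract_pairs_and_prefix, chordSt]
  rw [fusion cho none [] ([] ++ extractPrefix cho) trivial]
  simp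

theorem extractPrefix_snoc (cho : List Int) (t : Int) :
    extractPrefix (cho ++ [t])
      = if hasR2 cho then extractPrefix cho
        else if 256 ≤ t ∧ t ≤ 16767 then extractPrefix cho
        else extractPrefix cho ++ [t] := by
  induction cho with
  | nil => simp [extractPrefix, hasR2]
  | cons x xs ih =>
    by_cases hx : 256 ≤ x ∧ x ≤ 16767
    · simp [extractPrefix, hasR2, hx]
    · simp only [List.cons_append, extractPrefix, hasR2, List.any_cons, if_neg hx, ih]
      have : (decide (256 ≤ x ∧ x ≤ 16767)) = false := by simp [hx]
      rw [this]
      simp only [Bool.false_or]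
      split_ifs <;> simp

theorem hasR2_snoc (cho : List Int) (t : Int) :
    hasR2 (cho ++ [t]) = (hasR2 cho || decide (256 ≤ t ∧ t ≤ 16767)) := by
  simp [hasR2]

-- MAIN INVARIANT
theorem main_inv (ts : List Int) : ∀ (chords : List (List Int)) (cho : List Int),
    (let s := ts.foldl splitStep (chords, cho);
     (if s.2 ≠ [] then s.1 ++ [s.2] else s.1).foldl processChord [])
      = chords.foldl processChord [] ++ extractPrefix cho
        ++ Bfin (ts.foldl bstep ([], !hasR2 cho, (chordSt cho).1, (chordSt cho).2.1, (chordSt cho).2.2)) := by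
  induction ts with
  | nil =>
    intro chords cho
    simp only [List.foldl_nil, Bfin]
    by_cases h : cho = []
    · subst h; simp [chordSt, extractPrefix]
    · rw [if_pos (by simpa using h), sanChords_snoc, processOne]
      simp
  | cons t ts ih =>
    intro chords cho
    simp only [List.foldl_cons]
    by_cases ht : t < 256
    · -- chord boundary: flush
      rw [show splitStep (chords, cho) t
          = ((if cho ≠ [] then chords ++ [cho] else chords, [t])) by simp [splitStep, ht]]
      rw [show bstep (([] : List Int), !hasR2 cho, (chordSt cho).1, (chordSt cho).2.1, (chordSt cho).2.2) t
          = (([] ++ (chordSt cho).2.2 ++ [t], true, none, [], [])) by simp [bstep, ht]]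
      rw [ih (if cho ≠ [] then chords ++ [cho] else chords) [t]]
      rw [bfin_frame ts ([] ++ (chordSt cho).2.2 ++ [t]) true none [] []]
      have hcs : chordSt [t] = ((none, [], [])) := by
        simp [chordSt, istep, ht]
      have hh : hasR2 [t] = false := by simp [hasR2]; omega
      rw [hcs, hh]
      have hpt : extractPrefix [t] = [t] := by
        simp [extractPrefix, show ¬(256 ≤ t ∧ t ≤ 16767) from by omega]
      rw [hpt]
      by_cases h : cho = []
      · subst h
        simp [chordSt, extractPrefix]
      · rw [if_pos (by simpa using h), sanChords_snoc, processOne]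
        simp
    · -- inside a chord
      rw [show splitStep (chords, cho) t = ((chords, cho ++ [t])) by
        simp [splitStep, ht]]
      rw [ih chords (cho ++ [t])]
      have hcs : chordSt (cho ++ [t]) = istep (chordSt cho) t := by
        simp [chordSt]
      -- compute one bstep and compare
      rcases hc : chordSt cho with ⟨pd, sn, pr⟩
      rw [hcs, hc]
      rw [extractPrefix_snoc, hasR2_snoc]
      by_cases h2 : 256 ≤ t ∧ t ≤ 16767
      · rw [show bstep (([] : List Int), !hasR2 cho, pd, sn, pr) t
            = (([], false, some t, sn, pr)) by simp [bstep, h2, ht]]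
        rw [show istep ((pd, sn, pr)) t = ((some t, sn, pr)) by simp [istep, h2, ht]]
        rw [show (hasR2 cho || decide (256 ≤ t ∧ t ≤ 16767)) = true by simp [h2]]
        simp only [Bool.not_true]
        split_ifs <;> simp
      · -- t ≥ 256, not RANGE2: prefix emission depends on in_prefix
        have hb : bstep (([] : List Int), !hasR2 cho, pd, sn, pr) t
            = (((if !hasR2 cho then [t] else []), !hasR2 cho,
               (istep ((pd, sn, pr)) t).1, (istep ((pd, sn, pr)) t).2.1,
               (istep ((pd, sn, pr)) t).2.2)) := by
          rcases pd with _ | p <;>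
            simp only [bstep, istep, ht, h2, if_false] <;>
            split_ifs <;> simp
        rw [hb]
        rcases hi : istep ((pd, sn, pr)) t with ⟨pd', sn', pr'⟩
        simp only []
        rw [bfin_frame ts (if !hasR2 cho then [t] else []) (!hasR2 cho) pd' sn' pr']
        rw [show (hasR2 cho || decide (256 ≤ t ∧ t ≤ 16767)) = hasR2 cho by simp [h2]]
        rw [if_neg h2]
        cases hR : hasR2 cho <;> simp

-- ===== VERDICT (by name: the statement is the Claim_ definition above) =====
theorem sanitize_tokens_spec : Claim_equal_sanitize_tokens := by
  intro tokens _
  show sanitize_tokens tokens = sanitize_tokens_alt tokens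
  have h := main_inv tokens [] []
  simpa [sanitize_tokens, sanitize_tokens_alt, chordSt, hasR2, extractPrefix] using h
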